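-- pv_equiv track=rewrite | github.com/jpzgoku/projectEuler | python/30-39/problem35.py | no_even_digits
-- ===== SOURCE A (Python) =====
-- def no_even_digits(n):
--     """Removes all obvious not circular primes from a primes() list.
--
--     Args:
--         n: Number to test.
--
--     Returns:
--         If ``n`` has a an even digit or a ``5`` and is more than 1 digit long then False. Otherwise True.
--     """
--     if len(str(n)) < 2:
--         return True
--     not_prime = ['0', '2', '4', '5', '6', '8']
--     for num in not_prime:
--         if num in str(n):
--             return False
--     return True
-- ===== SOURCE B (Python) =====
-- def no_even_digits(n):
--     s = str(n)
--     if len(s) < 2: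
--         return True
--     bad = set('024568')
--     return not any(c in bad for c in s)
-- ===== Notes on version B (the rewrite author's own statement) =====
-- stated objective: simpler
-- what changed: A scans str(n) once per bad digit (six substring searches); B computes str(n) once and makes a single pass over its characters testing each against a bad-digit set.
import Mathlib
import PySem

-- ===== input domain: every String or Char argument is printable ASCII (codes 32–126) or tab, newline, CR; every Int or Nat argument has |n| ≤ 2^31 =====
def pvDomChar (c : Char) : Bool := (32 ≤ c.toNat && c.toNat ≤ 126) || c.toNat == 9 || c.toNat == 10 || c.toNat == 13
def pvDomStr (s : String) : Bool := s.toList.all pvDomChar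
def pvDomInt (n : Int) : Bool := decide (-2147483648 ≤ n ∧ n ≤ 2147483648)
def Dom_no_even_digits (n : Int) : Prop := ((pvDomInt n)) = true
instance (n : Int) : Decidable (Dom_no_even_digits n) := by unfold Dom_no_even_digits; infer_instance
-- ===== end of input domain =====

-- B computes str(n) once and makes ONE pass over its characters against a bad-digit set,
-- instead of A's six substring scans of str(n) (objective: simpler).

-- ===== PORT A =====
-- the 'for num in not_prime: if num in str(n): return False' loop
def noEvenDigitsLoopA : List String → Int → Bool
  | [], _ => true
  | num :: rest, n =>
    if PySem.Str.isIn num (PySem.Int.toStr n) then false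
    else noEvenDigitsLoopA rest n

def no_even_digits (n : Int) : Bool :=
  if PySem.Str.len (PySem.Int.toStr n) < 2 then true
  else noEvenDigitsLoopA ["0", "2", "4", "5", "6", "8"] n

-- ===== PORT B =====
def no_even_digits_alt (n : Int) : Bool :=
  let s := PySem.Int.toStr n
  if PySem.Str.len s < 2 then true
  else !(s.toList.any (fun c => (PySem.Set.ofList ("024568".toList)).contains c))

-- ===== PRECONDITION & SPEC =====
def Spec_no_even_digits (n : Int) (out : Bool) : Prop := out = no_even_digits_alt n
instance (n : Int) (out : Bool) : Decidable (Spec_no_even_digits n out) := by unfold Spec_no_even_digits; infer_instance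

-- ===== CLAIM (what is proved, stated in full; the proofs are below) =====
def Claim_equal_no_even_digits : Prop := ∀ (n : Int), Dom_no_even_digits n → Spec_no_even_digits n (no_even_digits n)

-- ===== LEMMAS AND PROOFS =====

-- a one-char substring test is a character-membership test
theorem isIn_singleton (c : Char) (l : List Char) :
    PySem.Chars.isIn [c] l = l.contains c := by
  rcases h : l.contains c with _ | _
  · rw [PySem.Chars.isIn_eq_false_iff]
    intro hinf
    have : c ∈ l := hinf.subset (by simp)
    simp at h
    exact h this
  · rw [PySem.Chars.isIn_iff_infix]
    simp only [List.contains_iff_mem] at h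
    obtain ⟨s1, s2, rfl⟩ := List.append_of_mem h
    exact ⟨s1, s2, by simp⟩

theorem bool6 (a b c d e f : Bool) :
    (if a = true then false
     else if b = true then false
     else if c = true then false
     else if d = true then false
     else if e = true then false
     else if f = true then false
     else true)
    = !(a || (b || (c || (d || (e || f))))) := by
  cases a <;> cases b <;> cases c <;> cases d <;> cases e <;> cases f <;> simp

-- ===== VERDICT (by name: the statement is the Claim_ definition above) =====

set_option maxHeartbeats 1000000 in
theorem no_even_digits_spec : Claim_equal_no_even_digits := by
  intro n _
  show no_even_digits n = no_even_digits_alt n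
  unfold no_even_digits no_even_digits_alt
  by_cases hlen : PySem.Str.len (PySem.Int.toStr n) < 2
  · simp only [if_pos hlen]
  · simp only [if_neg hlen]
    have h0 : PySem.Str.isIn "0" (PySem.Int.toStr n) = (PySem.Int.toStr n).toList.contains '0' := by
      rw [PySem.Str.isIn_eq]; exact isIn_singleton '0' _
    have h2 : PySem.Str.isIn "2" (PySem.Int.toStr n) = (PySem.Int.toStr n).toList.contains '2' := by
      rw [PySem.Str.isIn_eq]; exact isIn_singleton '2' _
    have h4 : PySem.Str.isIn "4" (PySem.Int.toStr n) = (PySem.Int.toStr n).toList.contains '4' := by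
      rw [PySem.Str.isIn_eq]; exact isIn_singleton '4' _
    have h5 : PySem.Str.isIn "5" (PySem.Int.toStr n) = (PySem.Int.toStr n).toList.contains '5' := by
      rw [PySem.Str.isIn_eq]; exact isIn_singleton '5' _
    have h6 : PySem.Str.isIn "6" (PySem.Int.toStr n) = (PySem.Int.toStr n).toList.contains '6' := by
      rw [PySem.Str.isIn_eq]; exact isIn_singleton '6' _
    have h8 : PySem.Str.isIn "8" (PySem.Int.toStr n) = (PySem.Int.toStr n).toList.contains '8' := by
      rw [PySem.Str.isIn_eq]; exact isIn_singleton '8' _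
    have hbad : PySem.Set.ofList "024568".toList = ['0', '2', '4', '5', '6', '8'] := rfl
    have hany : ((PySem.Int.toStr n).toList.any fun c =>
          (PySem.Set.ofList "024568".toList).contains c)
        = ((PySem.Int.toStr n).toList.contains '0' ||
            ((PySem.Int.toStr n).toList.contains '2' ||
              ((PySem.Int.toStr n).toList.contains '4' ||
                ((PySem.Int.toStr n).toList.contains '5' ||
                  ((PySem.Int.toStr n).toList.contains '6' ||
                    (PySem.Int.toStr n).toList.contains '8'))))) := by
      rw [Bool.eq_iff_iff, hbad]
      simp only [List.any_eq_true, List.contains_iff_mem, PySem.Set.contains_eq_listContains,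
        Bool.or_eq_true, List.mem_cons, List.not_mem_nil, or_false]
      constructor
      · rintro ⟨c, hc, rfl | rfl | rfl | rfl | rfl | rfl⟩ <;> tauto
      · rintro (h | h | h | h | h | h) <;> exact ⟨_, h, by tauto⟩
    simp only [noEvenDigitsLoopA, h0, h2, h4, h5, h6, h8, hany]
    exact bool6 _ _ _ _ _ _
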